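-- pv_equiv track=rewrite | github.com/neuroailab/whisker_model | cmd_gen_mp4/get_ratMap.py | LOCAL_SetupWhiskerNames
-- ===== SOURCE A (Python) =====
-- def LOCAL_SetupWhiskerNames(wselect):
--
--     wname = ['A0','A1','A2','A3','A4',
--               'B0','B1','B2','B3','B4','B5',
--               'C0','C1','C2','C3','C4','C5','C6',
--               'D0','D1','D2','D3','D4','D5','D6',
--               'E1','E2','E3','E4','E5','E6']
--
--     lwname  = ['L' + nam_per for nam_per in wname]
--     rwname  = ['R' + nam_per for nam_per in wname]
--     lwname.extend(rwname)
--     wname   = lwname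
--     allow_list  = "LRABCDE0123456"
--     for wpart in wselect:
--         if wpart not in allow_list:
--             continue
--         wname   = [wname_tmp for wname_tmp in wname if wpart in wname_tmp]
--
--     return wname
-- ===== SOURCE B (Python) =====
-- def LOCAL_SetupWhiskerNames(wselect):
--     # Extract at most one constraint per category (side, row, digit); conflicting
--     # constraints make the result empty. Then CONSTRUCT matching names directly,
--     # never filtering any list.
--     side = row = dig = None
--     ok = True
--     for c in wselect:
--         if c in 'LR':
--             if side is None:
--                 side = c
--             elif side != c:
--                 ok = False
--         elif c in 'ABCDE':
--             if row is None:
--                 row = c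
--             elif row != c:
--                 ok = False
--         elif c in '0123456':
--             if dig is None:
--                 dig = c
--             elif dig != c:
--                 ok = False
--     if not ok:
--         return []
--     out = []
--     for s in 'LR':
--         if side is not None and s != side:
--             continue
--         for r, digits in (('A', '01234'), ('B', '012345'),
--                           ('C', '0123456'), ('D', '0123456'), ('E', '123456')):
--             if row is not None and r != row:
--                 continue
--             for d in digits:
--                 if dig is not None and d != dig:
--                     continue
--                 out.append(s + r + d)
--     return out
-- ===== Notes on version B (the rewrite author's own statement) =====
-- stated objective: alternative
-- what changed: A repeatedly filters the 62-name list once per selected character; B never filters a list: one scan extracts at most one side/row/digit constraint (with a conflict flag), and the result is constructed directly by nested generation loops over the sides, the row table and each row's digit range.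
import Mathlib
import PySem

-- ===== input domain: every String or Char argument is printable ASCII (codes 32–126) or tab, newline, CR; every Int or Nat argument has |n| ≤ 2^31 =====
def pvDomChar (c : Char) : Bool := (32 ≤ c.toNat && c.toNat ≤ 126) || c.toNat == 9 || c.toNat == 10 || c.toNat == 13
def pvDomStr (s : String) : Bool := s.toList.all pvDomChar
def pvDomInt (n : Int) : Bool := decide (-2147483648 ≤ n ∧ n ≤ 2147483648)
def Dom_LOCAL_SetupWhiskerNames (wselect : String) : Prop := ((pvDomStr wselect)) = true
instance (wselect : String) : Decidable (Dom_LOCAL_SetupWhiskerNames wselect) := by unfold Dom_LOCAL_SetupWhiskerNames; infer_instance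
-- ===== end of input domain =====

-- B replaces A's repeated filtering of the 62-name list (one filter rebuild per selected
-- character) by a constraint-extraction + direct construction algorithm: one scan records
-- at most one side/row/digit constraint (and a conflict flag), then the matching names are
-- GENERATED from the constraints, never filtering any list (objective: alternative).


-- ===== PORT A =====
def pvBaseNames : List String :=
  ["A0","A1","A2","A3","A4",
   "B0","B1","B2","B3","B4","B5",
   "C0","C1","C2","C3","C4","C5","C6",
   "D0","D1","D2","D3","D4","D5","D6",
   "E1","E2","E3","E4","E5","E6"]

-- allow_list = "LRABCDE0123456" (as its character list; `wpart in allow_list` for a single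
-- character wpart is membership in this list)
def pvAllowList : List Char := ['L','R','A','B','C','D','E','0','1','2','3','4','5','6']

-- A: build L/R-prefixed names, then for each selected character in the allow list,
-- rebuild wname keeping only names containing it.
def LOCAL_SetupWhiskerNames (wselect : String) : List String :=
  let lwname := pvBaseNames.map (fun nam => "L" ++ nam)
  let rwname := pvBaseNames.map (fun nam => "R" ++ nam)
  let wname := lwname ++ rwname
  wselect.toList.foldl
    (fun acc wpart =>
      if pvAllowList.contains wpart then
        acc.filter (fun n => n.toList.contains wpart)
      else acc)
    wname

-- ===== PORT B =====
-- `c in 'LR'` / `c in 'ABCDE'` / `c in '0123456'` for a single character c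
def pvInLR (c : Char) : Bool := c == 'L' || c == 'R'
def pvInRow (c : Char) : Bool := c == 'A' || c == 'B' || c == 'C' || c == 'D' || c == 'E'
def pvInDig (c : Char) : Bool :=
  c == '0' || c == '1' || c == '2' || c == '3' || c == '4' || c == '5' || c == '6'

-- one loop iteration of B's constraint-extraction scan (state: side, row, dig, ok)
def pvStep (st : Option Char × Option Char × Option Char × Bool) (c : Char) :
    Option Char × Option Char × Option Char × Bool :=
  match st with
  | (side, row, dig, ok) =>
    if pvInLR c then
      match side with
      | none => (some c, row, dig, ok)
      | some x => (some x, row, dig, ok && (x == c))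
    else if pvInRow c then
      match row with
      | none => (side, some c, dig, ok)
      | some x => (side, some x, dig, ok && (x == c))
    else if pvInDig c then
      match dig with
      | none => (side, row, some c, ok)
      | some x => (side, row, some x, ok && (x == c))
    else (side, row, dig, ok)

-- the row table (('A','01234'), …) of B's generation loops
def pvRowTable : List (Char × List Char) :=
  [('A', ['0','1','2','3','4']),
   ('B', ['0','1','2','3','4','5']),
   ('C', ['0','1','2','3','4','5','6']),
   ('D', ['0','1','2','3','4','5','6']),
   ('E', ['1','2','3','4','5','6'])]

-- `o is None or c == o` (the negation of B's `continue` guard)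
def pvMatch (o : Option Char) (c : Char) : Bool :=
  match o with
  | none => true
  | some x => x == c

-- B's nested generation loops (side, then row, then digit), appending s+r+d
def pvGen (side row dig : Option Char) : List String :=
  ['L','R'].foldl
    (fun out s =>
      if pvMatch side s then
        pvRowTable.foldl
          (fun out rd =>
            if pvMatch row rd.1 then
              rd.2.foldl
                (fun out d =>
                  if pvMatch dig d then out ++ [String.ofList [s, rd.1, d]] else out)
                out
            else out)
          out
      else out)
    []

-- B: scan wselect once extracting at most one constraint per category (conflict ⇒ []),
-- then construct the matching names directly.
def LOCAL_SetupWhiskerNames_alt (wselect : String) : List String :=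
  match wselect.toList.foldl pvStep (none, none, none, true) with
  | (side, row, dig, ok) => if ok then pvGen side row dig else []

-- ===== PRECONDITION & SPEC =====
def Spec_LOCAL_SetupWhiskerNames (wselect : String) (out : List String) : Prop := out = LOCAL_SetupWhiskerNames_alt wselect
instance (wselect : String) (out : List String) : Decidable (Spec_LOCAL_SetupWhiskerNames wselect out) := by unfold Spec_LOCAL_SetupWhiskerNames; infer_instance

-- ===== CLAIM (what is proved, stated in full; the proofs are below) =====
def Claim_equal_LOCAL_SetupWhiskerNames : Prop := ∀ (wselect : String), Dom_LOCAL_SetupWhiskerNames wselect → Spec_LOCAL_SetupWhiskerNames wselect (LOCAL_SetupWhiskerNames wselect)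

-- ===== LEMMAS AND PROOFS =====

-- A's left fold of repeated filters equals one filter by the conjunction over the
-- allow-filtered characters.
theorem pv_fold_filter (cs : List Char) (l : List String) :
    cs.foldl
      (fun acc wpart =>
        if pvAllowList.contains wpart then
          acc.filter (fun n => n.toList.contains wpart)
        else acc)
      l
    = l.filter (fun name =>
        (cs.filter (fun c => pvAllowList.contains c)).all
          (fun c => name.toList.contains c)) := by
  induction cs generalizing l with
  | nil => simp
  | cons c cs ih =>
    simp only [List.foldl_cons, List.filter_cons]
    by_cases h : pvAllowList.contains c = true
    · rw [if_pos h, if_pos h, ih, List.filter_filter]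
      apply List.filter_congr
      intro x _
      simp [List.all_cons, Bool.and_comm]
    · rw [if_neg h, if_neg h, ih]

-- membership in the allow list splits into the three disjoint categories
theorem pv_allow_split (c : Char) :
    pvAllowList.contains c = (pvInLR c || pvInRow c || pvInDig c) := by
  simp [pvAllowList, pvInLR, pvInRow, pvInDig, Bool.or_assoc, Bool.beq_eq_decide_eq]

theorem pv_lr_cases (c : Char) (h : pvInLR c = true) : c = 'L' ∨ c = 'R' := by
  simpa [pvInLR] using h

theorem pv_row_cases (c : Char) (h : pvInRow c = true) :
    c = 'A' ∨ c = 'B' ∨ c = 'C' ∨ c = 'D' ∨ c = 'E' := by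
  simp [pvInRow] at h; tauto

theorem pv_dig_cases (c : Char) (h : pvInDig c = true) :
    c = '0' ∨ c = '1' ∨ c = '2' ∨ c = '3' ∨ c = '4' ∨ c = '5' ∨ c = '6' := by
  simp [pvInDig] at h; tauto

-- the three categories are pairwise disjoint
theorem pv_lr_not (c : Char) (h : pvInLR c = true) :
    pvInRow c = false ∧ pvInDig c = false := by
  rcases pv_lr_cases c h with h | h <;> subst h <;> decide

theorem pv_row_not (c : Char) (h : pvInRow c = true) : pvInDig c = false := by
  rcases pv_row_cases c h with h | h | h | h | h <;> subst h <;> decide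

-- component view of the scan state after processing cs from an arbitrary state
def pvExt (o : Option Char) (l : List Char) : Option Char :=
  match o with
  | some x => some x
  | none => l.head?

def pvChk (o : Option Char) (l : List Char) : Bool :=
  match o, l with
  | some x, l => l.all (fun y => x == y)
  | none, [] => true
  | none, h :: t => t.all (fun y => h == y)

theorem pv_scan (cs : List Char) (s r d : Option Char) (ok : Bool) :
    cs.foldl pvStep (s, r, d, ok) =
      (pvExt s (cs.filter pvInLR), pvExt r (cs.filter pvInRow), pvExt d (cs.filter pvInDig),
       ((ok && pvChk s (cs.filter pvInLR)) && pvChk r (cs.filter pvInRow))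
         && pvChk d (cs.filter pvInDig)) := by
  induction cs generalizing s r d ok with
  | nil => cases s <;> cases r <;> cases d <;> simp [pvExt, pvChk]
  | cons c cs ih =>
    simp only [List.foldl_cons, List.filter_cons]
    by_cases h1 : pvInLR c = true
    · obtain ⟨h2, h3⟩ := pv_lr_not c h1
      cases s with
      | none =>
        rw [show pvStep (none, r, d, ok) c = (some c, r, d, ok) by simp [pvStep, h1], ih]
        simp [h1, h2, h3, pvExt, pvChk]
      | some x =>
        rw [show pvStep (some x, r, d, ok) c = (some x, r, d, ok && (x == c)) by
              simp [pvStep, h1], ih]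
        simp [h1, h2, h3, pvExt, pvChk, Bool.and_assoc]
    · by_cases h2 : pvInRow c = true
      · have h3 := pv_row_not c h2
        cases r with
        | none =>
          rw [show pvStep (s, none, d, ok) c = (s, some c, d, ok) by simp [pvStep, h1, h2], ih]
          simp [h1, h2, h3, pvExt, pvChk]
        | some x =>
          rw [show pvStep (s, some x, d, ok) c = (s, some x, d, ok && (x == c)) by
                simp [pvStep, h1, h2], ih]
          simp [h1, h2, h3, pvExt, pvChk, Bool.and_assoc, Bool.and_left_comm, Bool.and_comm]
      · by_cases h3 : pvInDig c = true
        · cases d with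
          | none =>
            rw [show pvStep (s, r, none, ok) c = (s, r, some c, ok) by
                  simp [pvStep, h1, h2, h3], ih]
            simp [h1, h2, h3, pvExt, pvChk]
          | some x =>
            rw [show pvStep (s, r, some x, ok) c = (s, r, some x, ok && (x == c)) by
                  simp [pvStep, h1, h2, h3], ih]
            simp [h1, h2, h3, pvExt, pvChk, Bool.and_assoc, Bool.and_left_comm, Bool.and_comm]
        · rw [show pvStep (s, r, d, ok) c = (s, r, d, ok) by
                cases s <;> cases r <;> cases d <;> simp [pvStep, h1, h2, h3], ih]
          simp [h1, h2, h3]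

-- `all` over the allow-filtered characters splits over the three category filters
theorem pv_sel_all (cs : List Char) (p : Char → Bool) :
    (cs.filter (fun c => pvAllowList.contains c)).all p
      = (((cs.filter pvInLR).all p && (cs.filter pvInRow).all p)
          && (cs.filter pvInDig).all p) := by
  rw [Bool.eq_iff_iff]
  simp only [List.all_eq_true, List.mem_filter, Bool.and_eq_true, pv_allow_split,
    Bool.or_eq_true]
  constructor
  · intro h
    exact ⟨⟨fun x hx => h x ⟨hx.1, Or.inl (Or.inl hx.2)⟩,
            fun x hx => h x ⟨hx.1, Or.inl (Or.inr hx.2)⟩⟩,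
           fun x hx => h x ⟨hx.1, Or.inr hx.2⟩⟩
  · rintro ⟨⟨h1, h2⟩, h3⟩ x ⟨hx, hc⟩
    rcases hc with (hc | hc) | hc
    · exact h1 x ⟨hx, hc⟩
    · exact h2 x ⟨hx, hc⟩
    · exact h3 x ⟨hx, hc⟩

-- when the category chars are all equal, `all p` over them is p at the head
theorem pv_chk_all (l : List Char) (p : Char → Bool) (h : pvChk none l = true) :
    l.all p = (match l.head? with | none => true | some x => p x) := by
  cases l with
  | nil => rfl
  | cons a t =>
    simp only [pvChk, List.all_eq_true, beq_iff_eq] at h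
    simp only [List.head?_cons]
    cases hp : p a with
    | false => simp [List.all_cons, hp]
    | true =>
      simp only [List.all_cons, hp, Bool.true_and]
      exact List.all_eq_true.mpr (fun y hy => (h y hy) ▸ hp)

-- the full prefixed name list A starts from
def pvFullNames : List String :=
  pvBaseNames.map (fun nam => "L" ++ nam) ++ pvBaseNames.map (fun nam => "R" ++ nam)

-- the per-name condition induced by the (at most three) constraints
def pvCond (side row dig : Option Char) (n : String) : Bool :=
  ((match side with | none => true | some x => n.toList.contains x)
    && (match row with | none => true | some x => n.toList.contains x))
    && (match dig with | none => true | some x => n.toList.contains x)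

-- finite enumeration of the possible constraint values
def pvSideOpts : List (Option Char) := [none, some 'L', some 'R']
def pvRowOpts : List (Option Char) := [none, some 'A', some 'B', some 'C', some 'D', some 'E']
def pvDigOpts : List (Option Char) :=
  [none, some '0', some '1', some '2', some '3', some '4', some '5', some '6']

-- core: filtering the full list by the constraints equals B's direct construction
set_option maxRecDepth 2000 in
theorem pv_gen_eq : ∀ s ∈ pvSideOpts, ∀ r ∈ pvRowOpts, ∀ d ∈ pvDigOpts,
    pvFullNames.filter (pvCond s r d) = pvGen s r d := by decide

-- every prefixed name is three characters: a side, a row letter, a digit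
def pvShapeL (l : List Char) : Bool :=
  match l with
  | [s, r, d] => (pvInLR s && pvInRow r) && pvInDig d
  | _ => false

theorem pv_shape_all : ∀ n ∈ pvFullNames, pvShapeL n.toList = true := by decide

-- remaining pairwise disjointness of the categories
theorem pv_row_not' (c : Char) (h : pvInRow c = true) : pvInLR c = false := by
  rcases pv_row_cases c h with h | h | h | h | h <;> subst h <;> decide

theorem pv_dig_not (c : Char) (h : pvInDig c = true) :
    pvInLR c = false ∧ pvInRow c = false := by
  rcases pv_dig_cases c h with h | h | h | h | h | h | h <;> subst h <;> decide

-- a character of a given category contained in a shaped name is that name's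
-- character of the category; hence no name contains two distinct same-category chars
theorem pv_two_lr (l : List Char) (hn : pvShapeL l = true) (c1 : Char)
    (h1 : pvInLR c1 = true) (c2 : Char) (h2 : pvInLR c2 = true) (hne : c1 ≠ c2) :
    ¬(l.contains c1 = true ∧ l.contains c2 = true) := by
  rintro ⟨m1, m2⟩
  match l, hn with
  | [s, r, d], hn =>
    simp only [pvShapeL, Bool.and_eq_true] at hn
    obtain ⟨⟨hs, hr⟩, hd⟩ := hn
    have key : ∀ c, pvInLR c = true → ([s, r, d] : List Char).contains c = true → c = s := by
      intro c hc hm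
      simp only [List.contains_eq_mem, List.mem_cons, List.not_mem_nil, or_false,
        decide_eq_true_eq] at hm
      rcases hm with h | h | h
      · exact h
      · exact absurd hc (by simp [pv_row_not' r hr, h])
      · exact absurd hc (by simp [(pv_dig_not d hd).1, h])
    exact hne ((key c1 h1 m1).trans (key c2 h2 m2).symm)

theorem pv_two_row (l : List Char) (hn : pvShapeL l = true) (c1 : Char)
    (h1 : pvInRow c1 = true) (c2 : Char) (h2 : pvInRow c2 = true) (hne : c1 ≠ c2) :
    ¬(l.contains c1 = true ∧ l.contains c2 = true) := by
  rintro ⟨m1, m2⟩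
  match l, hn with
  | [s, r, d], hn =>
    simp only [pvShapeL, Bool.and_eq_true] at hn
    obtain ⟨⟨hs, hr⟩, hd⟩ := hn
    have key : ∀ c, pvInRow c = true → ([s, r, d] : List Char).contains c = true → c = r := by
      intro c hc hm
      simp only [List.contains_eq_mem, List.mem_cons, List.not_mem_nil, or_false,
        decide_eq_true_eq] at hm
      rcases hm with h | h | h
      · exact absurd hc (by simp [(pv_lr_not s hs).1, h])
      · exact h
      · exact absurd hc (by simp [(pv_dig_not d hd).2, h])
    exact hne ((key c1 h1 m1).trans (key c2 h2 m2).symm)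

theorem pv_two_dig (l : List Char) (hn : pvShapeL l = true) (c1 : Char)
    (h1 : pvInDig c1 = true) (c2 : Char) (h2 : pvInDig c2 = true) (hne : c1 ≠ c2) :
    ¬(l.contains c1 = true ∧ l.contains c2 = true) := by
  rintro ⟨m1, m2⟩
  match l, hn with
  | [s, r, d], hn =>
    simp only [pvShapeL, Bool.and_eq_true] at hn
    obtain ⟨⟨hs, hr⟩, hd⟩ := hn
    have key : ∀ c, pvInDig c = true → ([s, r, d] : List Char).contains c = true → c = d := by
      intro c hc hm
      simp only [List.contains_eq_mem, List.mem_cons, List.not_mem_nil, or_false,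
        decide_eq_true_eq] at hm
      rcases hm with h | h | h
      · exact absurd hc (by simp [(pv_lr_not s hs).2, h])
      · exact absurd hc (by simp [pv_row_not r hr, h])
      · exact h
    exact hne ((key c1 h1 m1).trans (key c2 h2 m2).symm)

-- a failed category check yields two distinct selected chars of that category
theorem pv_chk_false (l : List Char) (h : pvChk none l = false) :
    ∃ c1 ∈ l, ∃ c2 ∈ l, c1 ≠ c2 := by
  cases l with
  | nil => simp [pvChk] at h
  | cons a t =>
    simp only [pvChk] at h
    rw [List.all_eq_false] at h
    obtain ⟨y, hy, hne⟩ := h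
    refine ⟨a, List.mem_cons_self, y, List.mem_cons_of_mem _ hy, fun he => ?_⟩
    exact hne (by simp [he])

-- ===== VERDICT (by name: the statement is the Claim_ definition above) =====
theorem LOCAL_SetupWhiskerNames_spec : Claim_equal_LOCAL_SetupWhiskerNames := by
  intro wselect _
  unfold Spec_LOCAL_SetupWhiskerNames LOCAL_SetupWhiskerNames LOCAL_SetupWhiskerNames_alt
  rw [pv_fold_filter, pv_scan]
  set cs := wselect.toList with hcs
  simp only
  by_cases hS : pvChk none (cs.filter pvInLR) = true
  · by_cases hR : pvChk none (cs.filter pvInRow) = true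
    · by_cases hD : pvChk none (cs.filter pvInDig) = true
      · -- consistent constraints: reduce to pv_gen_eq
        rw [if_pos (by simp [hS, hR, hD])]
        have heq : (fun name => (cs.filter (fun c => pvAllowList.contains c)).all
              (fun c => name.toList.contains c)) =
            pvCond (pvExt none (cs.filter pvInLR)) (pvExt none (cs.filter pvInRow))
              (pvExt none (cs.filter pvInDig)) := by
          funext name
          rw [pv_sel_all]
          unfold pvCond
          simp only [pvExt]
          rw [pv_chk_all _ _ hS, pv_chk_all _ _ hR, pv_chk_all _ _ hD]
        rw [show (pvBaseNames.map (fun nam => "L" ++ nam) ++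
              pvBaseNames.map (fun nam => "R" ++ nam)) = pvFullNames from rfl, heq]
        -- enumerate the possible constraint values
        have hs : pvExt none (cs.filter pvInLR) ∈ pvSideOpts := by
          simp only [pvExt]
          cases hh : (cs.filter pvInLR).head? with
          | none => simp [pvSideOpts]
          | some x =>
            have hx : x ∈ cs.filter pvInLR := List.mem_of_mem_head? hh
            rcases pv_lr_cases x (List.of_mem_filter hx) with h | h <;>
              simp [pvSideOpts, h]
        have hr : pvExt none (cs.filter pvInRow) ∈ pvRowOpts := by
          simp only [pvExt]
          cases hh : (cs.filter pvInRow).head? with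
          | none => simp [pvRowOpts]
          | some x =>
            have hx : x ∈ cs.filter pvInRow := List.mem_of_mem_head? hh
            rcases pv_row_cases x (List.of_mem_filter hx) with h | h | h | h | h <;>
              simp [pvRowOpts, h]
        have hd : pvExt none (cs.filter pvInDig) ∈ pvDigOpts := by
          simp only [pvExt]
          cases hh : (cs.filter pvInDig).head? with
          | none => simp [pvDigOpts]
          | some x =>
            have hx : x ∈ cs.filter pvInDig := List.mem_of_mem_head? hh
            rcases pv_dig_cases x (List.of_mem_filter hx) with h | h | h | h | h | h | h <;>
              simp [pvDigOpts, h]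
        exact pv_gen_eq _ hs _ hr _ hd
      · -- digit conflict
        rw [if_neg (by simp [hD])]
        apply List.filter_eq_nil_iff.mpr
        intro n hn
        obtain ⟨c1, hc1, c2, hc2, hne⟩ := pv_chk_false _ (Bool.eq_false_iff.mpr hD)
        have h1 := List.of_mem_filter hc1
        have h2 := List.of_mem_filter hc2
        simp only [List.all_eq_true, List.mem_filter, pv_allow_split]
        intro hall
        exact pv_two_dig n.toList (pv_shape_all n hn) c1 h1 c2 h2 hne
          ⟨hall c1 ⟨List.mem_of_mem_filter hc1, by simp [h1]⟩,
           hall c2 ⟨List.mem_of_mem_filter hc2, by simp [h2]⟩⟩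
    · -- row conflict
      rw [if_neg (by simp [hR])]
      apply List.filter_eq_nil_iff.mpr
      intro n hn
      obtain ⟨c1, hc1, c2, hc2, hne⟩ := pv_chk_false _ (Bool.eq_false_iff.mpr hR)
      have h1 := List.of_mem_filter hc1
      have h2 := List.of_mem_filter hc2
      simp only [List.all_eq_true, List.mem_filter, pv_allow_split]
      intro hall
      exact pv_two_row n.toList (pv_shape_all n hn) c1 h1 c2 h2 hne
        ⟨hall c1 ⟨List.mem_of_mem_filter hc1, by simp [h1]⟩,
         hall c2 ⟨List.mem_of_mem_filter hc2, by simp [h2]⟩⟩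
  · -- side conflict
    rw [if_neg (by simp [hS])]
    apply List.filter_eq_nil_iff.mpr
    intro n hn
    obtain ⟨c1, hc1, c2, hc2, hne⟩ := pv_chk_false _ (Bool.eq_false_iff.mpr hS)
    have h1 := List.of_mem_filter hc1
    have h2 := List.of_mem_filter hc2
    simp only [List.all_eq_true, List.mem_filter, pv_allow_split]
    intro hall
    exact pv_two_lr n.toList (pv_shape_all n hn) c1 h1 c2 h2 hne
      ⟨hall c1 ⟨List.mem_of_mem_filter hc1, by simp [h1]⟩,
       hall c2 ⟨List.mem_of_mem_filter hc2, by simp [h2]⟩⟩
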